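-- pv_equiv track=rewrite | github.com/SamuelMR98/advent-of-code-25 | day2.py | is_invalid_id
-- ===== SOURCE A (Python) =====
-- def is_invalid_id(product_id):
--     id_str = str(product_id)
--     # Check for leading zeros
--     if id_str[0] == '0':
--         return True
--     length = len(id_str)
--     for sub_len in range(1, length // 2 + 1):
--         if length % sub_len == 0:
--             repetitions = length // sub_len
--             if repetitions == 2:
--                 substring = id_str[:sub_len]
--                 if substring * repetitions == id_str:
--                     return True
--     return False
-- ===== SOURCE B (Python) =====
-- def is_invalid_id(product_id):
--     id_str = str(product_id)
--     if id_str[0] == '0':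
--         return True
--     length = len(id_str)
--     half = length // 2
--     return length % 2 == 0 and id_str[:half] * 2 == id_str
-- ===== Notes on version B (the rewrite author's own statement) =====
-- stated objective: simpler
-- what changed: B drops A's divisor-scanning loop (which can only act when repetitions == 2, i.e. at sub_len == length//2) and does one direct even-length half-doubling comparison.
import Mathlib
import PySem

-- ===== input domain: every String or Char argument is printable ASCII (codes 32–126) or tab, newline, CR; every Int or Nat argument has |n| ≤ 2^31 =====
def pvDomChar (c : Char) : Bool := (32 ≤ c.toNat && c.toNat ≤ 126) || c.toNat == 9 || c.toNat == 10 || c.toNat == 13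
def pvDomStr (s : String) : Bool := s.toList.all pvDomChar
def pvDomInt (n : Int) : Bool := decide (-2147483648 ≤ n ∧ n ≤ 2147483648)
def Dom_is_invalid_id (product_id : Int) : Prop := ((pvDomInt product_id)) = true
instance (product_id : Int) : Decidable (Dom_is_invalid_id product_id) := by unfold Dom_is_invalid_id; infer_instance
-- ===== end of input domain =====

-- B replaces A's divisor-scanning loop by one direct even-length half-doubling comparison (simpler).

-- ===== PORT A =====
def is_invalid_id (product_id : Int) : Bool :=
  let id_str := PySem.Int.toChars product_id
  -- id_str[0] == '0'  (str(n) is never empty, so the IndexError branch is unreachable)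
  if PySem.List.pyGet? id_str 0 == some '0' then true
  else
    let length : Int := id_str.length
    (PySem.List.pyRange 1 (PySem.Int.floordiv length 2 + 1) 1).foldl
      (fun acc sub_len =>
        if acc then acc
        else if PySem.Int.mod length sub_len == 0 then
          let repetitions := PySem.Int.floordiv length sub_len
          if repetitions == 2 then
            let substring := PySem.List.slice id_str none (some sub_len)
            -- substring * repetitions == id_str  (hand-ported: Python string repetition; exact for repetitions ≥ 0)
            if (List.replicate repetitions.toNat substring).flatten == id_str then true
            else acc
          else acc
        else acc) false

-- ===== PORT B =====
def is_invalid_id_alt (product_id : Int) : Bool :=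
  let id_str := PySem.Int.toChars product_id
  if PySem.List.pyGet? id_str 0 == some '0' then true
  else
    let length : Int := id_str.length
    let half := PySem.Int.floordiv length 2
    -- id_str[:half] * 2 == id_str  (hand-ported: Python string repetition by 2 is one append)
    (PySem.Int.mod length 2 == 0) &&
      (PySem.List.slice id_str none (some half) ++ PySem.List.slice id_str none (some half) == id_str)

-- ===== PRECONDITION & SPEC =====
def Spec_is_invalid_id (product_id : Int) (out : Bool) : Prop := out = is_invalid_id_alt product_id
instance (product_id : Int) (out : Bool) : Decidable (Spec_is_invalid_id product_id out) := by unfold Spec_is_invalid_id; infer_instance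

-- ===== CLAIM (what is proved, stated in full; the proofs are below) =====
def Claim_equal_is_invalid_id : Prop := ∀ (product_id : Int), Dom_is_invalid_id product_id → Spec_is_invalid_id product_id (is_invalid_id product_id)

-- ===== LEMMAS AND PROOFS =====

-- str(n) is never empty
theorem tdc_len : ∀ (f n : Nat) (l : List Char), l.length < (Nat.toDigitsCore 10 (f+1) n l).length := by
  intro f
  induction f with
  | zero => intro n l; simp only [Nat.toDigitsCore]; split <;> simp
  | succ f ih =>
    intro n l
    simp only [Nat.toDigitsCore]
    split
    · simp
    · exact Nat.lt_trans (by simp) (ih _ _)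

theorem toChars_ne_nil (n : Int) : PySem.Int.toChars n ≠ [] := by
  unfold PySem.Int.toChars
  split
  · simp
  · unfold Nat.toDigits
    intro h
    have := tdc_len n.toNat n.toNat []
    simp [h] at this

-- A's early-return loop is an `any` over the range
theorem foldl_or_any {α : Type} (f : Bool → α → Bool) (p : α → Bool)
    (hf : ∀ a s, f a s = (a || p s)) :
    ∀ (l : List α) (acc : Bool), l.foldl f acc = (acc || l.any p) := by
  intro l
  induction l with
  | nil => simp
  | cons x xs ih =>
    intro acc
    simp [List.foldl, hf, ih, Bool.or_assoc]

-- A's loop-body test, as a predicate on the candidate sub-length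
def pvP (cs : List Char) (sub_len : Int) : Bool :=
  let L : Int := cs.length
  if PySem.Int.mod L sub_len == 0 then
    if PySem.Int.floordiv L sub_len == 2 then
      (List.replicate (PySem.Int.floordiv L sub_len).toNat
        (PySem.List.slice cs none (some sub_len))).flatten == cs
    else false
  else false

theorem pvP_iff (cs : List Char) (s : Int) (hs1 : 1 ≤ s) :
    pvP cs s = true ↔
      (cs.length : Int) % s = 0 ∧ (cs.length : Int) / s = 2 ∧
        PySem.List.slice cs none (some s) ++ PySem.List.slice cs none (some s) = cs := by
  unfold pvP
  simp only
  rw [PySem.Int.mod_eq_emod_of_pos (by omega), PySem.Int.floordiv_eq_ediv_of_pos (by omega)]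
  constructor
  · intro h
    split_ifs at h with hm hq
    · have hm' : (cs.length : Int) % s = 0 := by simpa using hm
      have hq' : (cs.length : Int) / s = 2 := by simpa using hq
      refine ⟨hm', hq', ?_⟩
      have h' := (beq_iff_eq).mp h
      rw [hq'] at h'
      simpa [List.replicate_succ] using h'
  · rintro ⟨hm, hq, happ⟩
    rw [if_pos (by simpa using hm), if_pos (by simpa using hq), beq_iff_eq, hq]
    simpa [List.replicate_succ] using happ

theorem is_invalid_id_eq_alt (pid : Int) : is_invalid_id pid = is_invalid_id_alt pid := by
  unfold is_invalid_id is_invalid_id_alt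
  simp only
  set cs := PySem.Int.toChars pid with hcs
  by_cases h0 : PySem.List.pyGet? cs 0 == some '0'
  · simp [h0]
  · rw [if_neg h0, if_neg h0]
    have hne : cs ≠ [] := by rw [hcs]; exact toChars_ne_nil pid
    have hlen : 1 ≤ cs.length := List.length_pos_iff.mpr hne
    have hL1 : 1 ≤ (cs.length : Int) := by omega
    rw [foldl_or_any _ (pvP cs) (by
      intro a s
      cases a <;> simp [pvP, Bool.beq_eq_decide_eq])]
    simp only [Bool.false_or]
    have hd2 : PySem.Int.floordiv (cs.length : Int) 2 = (cs.length : Int) / 2 :=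
      PySem.Int.floordiv_eq_ediv_of_pos (by omega)
    have hm2 : PySem.Int.mod (cs.length : Int) 2 = (cs.length : Int) % 2 :=
      PySem.Int.mod_eq_emod_of_pos (by omega)
    rw [hd2, hm2, Bool.eq_iff_iff]
    constructor
    · intro hany
      obtain ⟨s, hs, hps⟩ := List.any_eq_true.mp hany
      rw [PySem.List.mem_pyRange_one] at hs
      have hs1 : 1 ≤ s := hs.1
      obtain ⟨hm, hq, happ⟩ := (pvP_iff cs s hs1).mp hps
      have e := Int.mul_ediv_add_emod (cs.length : Int) s
      rw [hq] at e
      have hseq : s = (cs.length : Int) / 2 := by omega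
      rw [Bool.and_eq_true]
      refine ⟨by simp only [beq_iff_eq]; omega, ?_⟩
      rw [← hseq]
      simpa using happ
    · intro hB
      rw [Bool.and_eq_true] at hB
      have heven : (cs.length : Int) % 2 = 0 := by simpa using hB.1
      have happ := (beq_iff_eq).mp hB.2
      obtain ⟨h, hLh, hh1⟩ : ∃ h : Int, (cs.length : Int) = 2 * h ∧ 1 ≤ h :=
        ⟨(cs.length : Int) / 2, by omega, by omega⟩
      have hheq : (cs.length : Int) / 2 = h := by omega
      rw [hheq] at happ ⊢
      rw [List.any_eq_true]
      refine ⟨h, ?_, ?_⟩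
      · rw [PySem.List.mem_pyRange_one]
        exact ⟨hh1, by omega⟩
      · rw [pvP_iff cs h hh1]
        refine ⟨?_, ?_, happ⟩
        · rw [hLh]; exact Int.mul_emod_left 2 h
        · rw [hLh]; exact Int.mul_ediv_cancel 2 (by omega)

-- ===== VERDICT (by name: the statement is the Claim_ definition above) =====
theorem is_invalid_id_spec : Claim_equal_is_invalid_id := by
  intro pid _
  unfold Spec_is_invalid_id
  exact is_invalid_id_eq_alt pid
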